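-- pv_equiv track=rewrite | github.com/jdomeracki/SBH-GeneticAlgorithm | GA-implementation.py | find_best_seq
-- ===== SOURCE A (Python) =====
-- def find_best_seq(list_of_seqs, N):
--     best_score = 0
--     best_seq = None
--     for seq in list_of_seqs:
--         fintess_score = seq[4]
--         seq_length = seq[3]
--         if (fintess_score > best_score and seq_length <= N):
--             best_score = fintess_score
--             best_seq = seq
--     return best_seq
-- ===== SOURCE B (Python) =====
-- def find_best_seq(list_of_seqs, N):
--     candidates = [s for s in list_of_seqs if s[3] <= N and s[4] > 0]
--     ranked = sorted(candidates, key=lambda s: s[4], reverse=True)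
--     return ranked[0] if ranked else None
-- ===== Notes on version B (the rewrite author's own statement) =====
-- stated objective: alternative
-- what changed: Replaces A's single guarded scan with manual best_score/best_seq state by filtering the valid candidates (length bound, positive fitness), stably sorting them by fitness in descending order, and returning the head; sort stability makes the head the first maximal-fitness element, reproducing A's strict-update tie behaviour.
import Mathlib
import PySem

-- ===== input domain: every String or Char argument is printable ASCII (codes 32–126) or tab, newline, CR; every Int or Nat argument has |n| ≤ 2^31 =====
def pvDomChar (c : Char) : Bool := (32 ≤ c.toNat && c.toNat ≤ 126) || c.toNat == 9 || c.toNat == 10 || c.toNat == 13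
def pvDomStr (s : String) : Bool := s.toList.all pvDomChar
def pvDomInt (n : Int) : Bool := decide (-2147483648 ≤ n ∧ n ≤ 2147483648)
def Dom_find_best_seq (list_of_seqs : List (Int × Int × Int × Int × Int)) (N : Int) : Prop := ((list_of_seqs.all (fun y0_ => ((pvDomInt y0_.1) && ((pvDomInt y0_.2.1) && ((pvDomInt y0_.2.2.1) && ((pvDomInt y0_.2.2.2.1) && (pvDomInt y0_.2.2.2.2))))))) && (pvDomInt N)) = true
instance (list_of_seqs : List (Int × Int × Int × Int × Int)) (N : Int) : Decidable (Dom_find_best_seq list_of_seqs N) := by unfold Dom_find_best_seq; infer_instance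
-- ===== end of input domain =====

-- B: filter the valid candidates, stably sort them by fitness descending and return the head
-- (stability makes the head the first maximal element), instead of A's guarded scan with manual best state.
-- ===== PORT A =====
def find_best_seq (list_of_seqs : List (Int × Int × Int × Int × Int)) (N : Int) : Option (Int × Int × Int × Int × Int) :=
  (list_of_seqs.foldl
    (fun acc seq =>
      let fintess_score := seq.2.2.2.2
      let seq_length := seq.2.2.2.1
      if fintess_score > acc.1 ∧ seq_length ≤ N then (fintess_score, some seq) else acc)
    ((0 : Int), (none : Option (Int × Int × Int × Int × Int)))).2

-- ===== PORT B =====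
def find_best_seq_alt (list_of_seqs : List (Int × Int × Int × Int × Int)) (N : Int) : Option (Int × Int × Int × Int × Int) :=
  let candidates := list_of_seqs.filter (fun s => decide (s.2.2.2.1 ≤ N) && decide (0 < s.2.2.2.2))
  let ranked := PySem.List.sorted candidates (fun s => s.2.2.2.2) true
  match ranked with
  | [] => none
  | r :: _ => some r

-- ===== PRECONDITION & SPEC =====
def Spec_find_best_seq (list_of_seqs : List (Int × Int × Int × Int × Int)) (N : Int) (out : Option (Int × Int × Int × Int × Int)) : Prop := out = find_best_seq_alt list_of_seqs N
instance (list_of_seqs : List (Int × Int × Int × Int × Int)) (N : Int) (out : Option (Int × Int × Int × Int × Int)) : Decidable (Spec_find_best_seq list_of_seqs N out) := by unfold Spec_find_best_seq; infer_instance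

-- ===== CLAIM (what is proved, stated in full; the proofs are below) =====
def Claim_equal_find_best_seq : Prop := ∀ (list_of_seqs : List (Int × Int × Int × Int × Int)) (N : Int), Dom_find_best_seq list_of_seqs N → Spec_find_best_seq list_of_seqs N (find_best_seq list_of_seqs N)

-- ===== LEMMAS AND PROOFS =====

-- A's running (best_score, best_seq) fold agrees with a first-max fold over the filtered list
theorem fbs_loop (N : Int) (l : List (Int × Int × Int × Int × Int)) :
    ∀ (sc : Int) (bs acc : Option (Int × Int × Int × Int × Int)),
      (match acc with
        | none => sc = 0 ∧ bs = none
        | some m => sc = m.2.2.2.2 ∧ bs = some m ∧ 0 < sc) →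
      (l.foldl
        (fun acc seq =>
          let fintess_score := seq.2.2.2.2
          let seq_length := seq.2.2.2.1
          if fintess_score > acc.1 ∧ seq_length ≤ N then (fintess_score, some seq) else acc)
        (sc, bs)).2
      = (l.filter (fun s => decide (s.2.2.2.1 ≤ N) && decide (0 < s.2.2.2.2))).foldl
          (fun acc x => match acc with
            | none => some x
            | some m => if m.2.2.2.2 < x.2.2.2.2 then some x else some m)
          acc := by
  induction l with
  | nil =>
      intro sc bs acc h
      cases acc with
      | none => simpa using h.2
      | some m => simpa using h.2.1
  | cons s t ih =>
      intro sc bs acc h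
      simp only [List.foldl_cons, List.filter_cons]
      by_cases hp : (s.2.2.2.1 ≤ N ∧ 0 < s.2.2.2.2)
      · have hpb : (decide (s.2.2.2.1 ≤ N) && decide (0 < s.2.2.2.2)) = true := by
          simp [hp.1, hp.2]
        rw [if_pos hpb, List.foldl_cons]
        cases acc with
        | none =>
            obtain ⟨h1, h2⟩ := h
            subst h1; subst h2
            rw [if_pos ⟨hp.2, hp.1⟩]
            exact ih _ _ _ (by exact ⟨rfl, rfl, hp.2⟩)
        | some m =>
            obtain ⟨h1, h2, h3⟩ := h
            subst h1; subst h2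
            by_cases hlt : m.2.2.2.2 < s.2.2.2.2
            · rw [if_pos ⟨hlt, hp.1⟩]
              simp only [if_pos hlt]
              exact ih _ _ _ ⟨rfl, rfl, lt_trans h3 hlt⟩
            · rw [if_neg (by exact fun hc => hlt hc.1)]
              simp only [if_neg hlt]
              exact ih _ _ _ ⟨rfl, rfl, h3⟩
      · have hpb : (decide (s.2.2.2.1 ≤ N) && decide (0 < s.2.2.2.2)) = false := by
          rcases not_and_or.mp hp with h' | h' <;> simp [h']
        have hsc : 0 ≤ sc := by
          cases acc with
          | none => exact le_of_eq h.1.symm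
          | some m => exact le_of_lt h.2.2
        have hno : ¬ (s.2.2.2.2 > sc ∧ s.2.2.2.1 ≤ N) := by
          rcases not_and_or.mp hp with h' | h'
          · exact fun hc => h' hc.2
          · exact fun hc => h' (lt_of_le_of_lt hsc hc.1)
        simp only [hpb, Bool.false_eq_true, if_false]
        rw [if_neg hno]
        exact ih _ _ _ h

-- inserting into a reverse-ordered list only replaces the head when the new key is strictly larger
theorem head_insertBy_rev (x : Int × Int × Int × Int × Int) (acc : List (Int × Int × Int × Int × Int)) :
    (PySem.List.insertBy (fun a b => decide (b.2.2.2.2 < a.2.2.2.2)) x acc).head?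
    = match acc.head? with
      | none => some x
      | some m => if m.2.2.2.2 < x.2.2.2.2 then some x else some m := by
  cases acc with
  | nil => rfl
  | cons y ys =>
      simp only [PySem.List.insertBy, List.head?_cons]
      by_cases h : y.2.2.2.2 < x.2.2.2.2
      · simp [h]
      · simp [h]

-- the head of the reverse insertion-sort fold is the first-max fold
theorem head_sorted_rev_fold (c : List (Int × Int × Int × Int × Int)) :
    ∀ (acc : List (Int × Int × Int × Int × Int)),
      (c.foldl (fun a x => PySem.List.insertBy (fun a b => decide (b.2.2.2.2 < a.2.2.2.2)) x a) acc).head?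
      = c.foldl (fun a x => match a with
          | none => some x
          | some m => if m.2.2.2.2 < x.2.2.2.2 then some x else some m) acc.head? := by
  induction c with
  | nil => intro acc; rfl
  | cons x t ih =>
      intro acc
      simp only [List.foldl_cons]
      rw [ih, head_insertBy_rev]

-- ===== VERDICT (by name: the statement is the Claim_ definition above) =====
theorem find_best_seq_spec : Claim_equal_find_best_seq := by
  intro l N _
  unfold Spec_find_best_seq find_best_seq find_best_seq_alt
  have h := fbs_loop N l 0 none none (by exact ⟨rfl, rfl⟩)
  rw [h]
  simp only [PySem.List.sorted, reduceIte]
  have h2 := head_sorted_rev_fold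
      (l.filter (fun s => decide (s.2.2.2.1 ≤ N) && decide (0 < s.2.2.2.2))) []
  simp only [List.head?_nil] at h2
  rw [← h2]
  cases hfold : (l.filter (fun s => decide (s.2.2.2.1 ≤ N) && decide (0 < s.2.2.2.2))).foldl
      (fun a x => PySem.List.insertBy (fun a b => decide (b.2.2.2.2 < a.2.2.2.2)) x a) [] with
  | nil => simp [hfold]
  | cons r rs => simp [hfold]
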